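-- pv_equiv track=rewrite | github.com/Arpitmurailya18/AJfiles-CP | jeffAndPeriods1.py | find_valid_x
-- ===== SOURCE A (Python) =====
-- from collections import defaultdict
--
-- def find_valid_x(a):
--     pos_map = defaultdict(list)
--
--     # Step 1: Collect positions of each element
--     for i in range(len(a)):
--         pos_map[a[i]].append(i+1)  # storing 1-based positions
--
--     valid_x = []
--
--     # Step 2: Check if positions form an AP
--     for x, positions in pos_map.items():
--         if len(positions) == 1:
--             valid_x.append((x, 0))
--         else:
--             common_diff = positions[1] - positions[0]
--             is_ap = True
--             for j in range(2, len(positions)):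
--                 if positions[j] - positions[j-1] != common_diff:
--                     is_ap = False
--                     break
--             if is_ap:
--                 valid_x.append((x, common_diff))
--
--     return valid_x
-- ===== SOURCE B (Python) =====
-- def find_valid_x(a):
--     # one pass: per element keep (last_position, diff_or_None, still_ap)
--     info = {}
--     for i, x in enumerate(a, 1):
--         if x not in info:
--             info[x] = (i, None, True)
--         else:
--             last, d, ok = info[x]
--             if d is None:
--                 info[x] = (i, i - last, True)
--             else:
--                 info[x] = (i, d, ok and i - last == d)
--     return [(x, 0 if d is None else d) for x, (last, d, ok) in info.items() if ok]
-- ===== Notes on version B (the rewrite author's own statement) =====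
-- stated objective: simpler
-- what changed: A first builds a dict of full position lists and then re-scans each list with an index loop for the AP check; B makes a single pass keeping only a (last position, common difference, still-AP flag) record per element and emits straight from the records, never materialising or re-scanning position lists.
import Mathlib
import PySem

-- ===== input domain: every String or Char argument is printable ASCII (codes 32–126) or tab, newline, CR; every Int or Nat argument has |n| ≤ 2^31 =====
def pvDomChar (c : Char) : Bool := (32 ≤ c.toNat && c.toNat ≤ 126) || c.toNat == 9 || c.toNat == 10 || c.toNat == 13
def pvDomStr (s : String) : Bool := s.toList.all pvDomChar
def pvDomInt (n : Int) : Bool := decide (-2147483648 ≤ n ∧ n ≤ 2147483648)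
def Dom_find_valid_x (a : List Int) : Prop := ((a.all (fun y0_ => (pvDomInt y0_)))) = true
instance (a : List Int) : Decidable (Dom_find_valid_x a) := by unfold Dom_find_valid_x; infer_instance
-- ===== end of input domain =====

-- B replaces A's two-pass "collect every position list, then scan each list for an AP" by a
-- single pass keeping only a (last position, common difference, still-AP flag) record per element.

-- ===== PORT A =====
-- inner 'for j in range(2, len(positions))' with its break; positions[j] via pyGetD (exact: 2 ≤ j < len)
def apLoop (positions : List Int) (cd : Int) : List Int → Bool
  | [] => true
  | j :: js =>
    if PySem.List.pyGetD positions j 0 - PySem.List.pyGetD positions (j - 1) 0 ≠ cd then false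
    else apLoop positions cd js

def find_valid_x (a : List Int) : List (Int × Int) :=
  -- Step 1: pos_map[a[i]].append(i+1)   (defaultdict(list) = Dict.modify with default [])
  let pos_map : PySem.Dict Int (List Int) :=
    (PySem.List.pyRange 0 (PySem.List.len a)).foldl
      (fun m i => m.modify (PySem.List.pyGetD a i 0) [] (· ++ [i + 1])) PySem.Dict.empty
  -- Step 2: check each position list for an AP  (positions[0], positions[1] via pyGetD: exact, len ≥ 2 there)
  pos_map.items.foldl
    (fun valid_x p =>
      if PySem.List.len p.2 = 1 then valid_x ++ [(p.1, 0)]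
      else
        let common_diff := PySem.List.pyGetD p.2 1 0 - PySem.List.pyGetD p.2 0 0
        if apLoop p.2 common_diff (PySem.List.pyRange 2 (PySem.List.len p.2))
        then valid_x ++ [(p.1, common_diff)] else valid_x)
    []

-- ===== PORT B =====
-- per-element record update: (i, None, True) on first sight; set the diff on the second; check it later
def updState (s : Option (Int × Option Int × Bool)) (i : Int) : Int × Option Int × Bool :=
  match s with
  | none => (i, none, true)
  | some (last, d, ok) =>
    match d with
    | none => (i, some (i - last), true)
    | some dv => (i, some dv, ok && decide (i - last = dv))

def find_valid_x_alt (a : List Int) : List (Int × Int) :=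
  -- for i, x in enumerate(a, 1): info[x] = updated record   (zipIdx 1 = enumerate(a, 1) as (x, i))
  let info : PySem.Dict Int (Int × Option Int × Bool) :=
    (a.zipIdx 1).foldl (fun d p => d.insert p.1 (updState (d.get? p.1) (p.2 : Int)))
      PySem.Dict.empty
  -- [(x, 0 if d is None else d) for x, (last, d, ok) in info.items() if ok]
  info.items.filterMap (fun q => if q.2.2.2 then some (q.1, q.2.2.1.getD 0) else none)

-- ===== PRECONDITION & SPEC =====
def Spec_find_valid_x (a : List Int) (out : List (Int × Int)) : Prop := out = find_valid_x_alt a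
instance (a : List Int) (out : List (Int × Int)) : Decidable (Spec_find_valid_x a out) := by unfold Spec_find_valid_x; infer_instance

-- ===== CLAIM (what is proved, stated in full; the proofs are below) =====
def Claim_equal_find_valid_x : Prop := ∀ (a : List Int), Dom_find_valid_x a → Spec_find_valid_x a (find_valid_x a)

-- ===== LEMMAS AND PROOFS =====

-- the two dicts the ports build, named for the proofs
def aDict (a : List Int) : PySem.Dict Int (List Int) :=
  (PySem.List.pyRange 0 (PySem.List.len a)).foldl
    (fun m i => m.modify (PySem.List.pyGetD a i 0) [] (· ++ [i + 1])) PySem.Dict.empty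

def bDict (a : List Int) : PySem.Dict Int (Int × Option Int × Bool) :=
  (a.zipIdx 1).foldl (fun d p => d.insert p.1 (updState (d.get? p.1) (p.2 : Int)))
    PySem.Dict.empty

-- the 1-based positions of x in a, counting from m
def posOf (x : Int) : List Int → Int → List Int
  | [], _ => []
  | y :: ys, i => if y = x then i :: posOf x ys (i + 1) else posOf x ys (i + 1)

-- all differences from prev onward equal d
def okFrom (prev d : Int) : List Int → Bool
  | [] => true
  | q :: qs => (decide (q - prev = d)) && okFrom q d qs

-- B's record after feeding a whole position list
def stO (ps : List Int) : Option (Int × Option Int × Bool) :=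
  ps.foldl (fun o v => some (updState o v)) none

-- what A emits for one (x, positions) item
def emitA (x : Int) (ps : List Int) : Option (Int × Int) :=
  if PySem.List.len ps = 1 then some (x, 0)
  else if apLoop ps (PySem.List.pyGetD ps 1 0 - PySem.List.pyGetD ps 0 0)
      (PySem.List.pyRange 2 (PySem.List.len ps))
  then some (x, PySem.List.pyGetD ps 1 0 - PySem.List.pyGetD ps 0 0) else none

-- what B emits for one (x, record) item
def emitB (x : Int) (st : Int × Option Int × Bool) : Option (Int × Int) :=
  if st.2.2 then some (x, st.2.1.getD 0) else none

lemma find_valid_x_def (a : List Int) :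
    find_valid_x a = (aDict a).items.foldl
      (fun valid_x p =>
        if PySem.List.len p.2 = 1 then valid_x ++ [(p.1, 0)]
        else
          if apLoop p.2 (PySem.List.pyGetD p.2 1 0 - PySem.List.pyGetD p.2 0 0)
              (PySem.List.pyRange 2 (PySem.List.len p.2))
          then valid_x ++ [(p.1, PySem.List.pyGetD p.2 1 0 - PySem.List.pyGetD p.2 0 0)]
          else valid_x)
      [] := rfl

lemma find_valid_x_alt_def (a : List Int) :
    find_valid_x_alt a = (bDict a).items.filterMap (fun q => emitB q.1 q.2) := rfl

-- one step of A's output loop, expressed through emitA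
lemma bodyA_apply (init : List (Int × Int)) (p : Int × List Int) :
    (if PySem.List.len p.2 = 1 then init ++ [(p.1, 0)]
     else
       if apLoop p.2 (PySem.List.pyGetD p.2 1 0 - PySem.List.pyGetD p.2 0 0)
           (PySem.List.pyRange 2 (PySem.List.len p.2))
       then init ++ [(p.1, PySem.List.pyGetD p.2 1 0 - PySem.List.pyGetD p.2 0 0)]
       else init)
      = init ++ (emitA p.1 p.2).toList := by
  rw [emitA]
  split_ifs <;> simp

-- A's output loop is a filterMap over the items
lemma foldlA_filterMap (l : List (Int × List Int)) (init : List (Int × Int)) :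
    l.foldl
      (fun valid_x p =>
        if PySem.List.len p.2 = 1 then valid_x ++ [(p.1, 0)]
        else
          if apLoop p.2 (PySem.List.pyGetD p.2 1 0 - PySem.List.pyGetD p.2 0 0)
              (PySem.List.pyRange 2 (PySem.List.len p.2))
          then valid_x ++ [(p.1, PySem.List.pyGetD p.2 1 0 - PySem.List.pyGetD p.2 0 0)]
          else valid_x)
      init = init ++ l.filterMap (fun p => emitA p.1 p.2) := by
  induction l generalizing init with
  | nil => simp
  | cons p l ih =>
    rw [List.foldl_cons, bodyA_apply init p, ih, List.filterMap_cons]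
    cases h : emitA p.1 p.2 <;> simp

-- B's dict lookup after the fold = the record fold over the matching positions
lemma alt_get? (l : List (Int × Nat)) (d : PySem.Dict Int (Int × Option Int × Bool)) (x : Int) :
    (l.foldl (fun d p => d.insert p.1 (updState (d.get? p.1) (p.2 : Int))) d).get? x
      = ((l.filter (fun p => p.1 == x)).map (fun p => ((p.2 : Nat) : Int))).foldl
          (fun o v => some (updState o v)) (d.get? x) := by
  induction l generalizing d with
  | nil => simp
  | cons p l ih =>
    rw [List.foldl_cons, ih, List.filter_cons]
    by_cases h : p.1 = x
    · subst h
      simp only [beq_self_eq_true, if_true, List.map_cons, List.foldl_cons,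
        PySem.Dict.get?_insert_self]
    · have hb : (p.1 == x) = false := by simp [h]
      simp only [hb, Bool.false_eq_true, if_false]
      rw [PySem.Dict.get?_insert_of_ne _ _ (fun he => h he.symm)]

-- A's filtered/mapped enumerated list = posOf
lemma A_pos (x : Int) : ∀ (a : List Int) (m : Int),
    (((List.range a.length).map (fun k => (a.getD k 0, (k : Int) + m))).filter
        (fun p => p.1 == x)).map (fun p => p.2) = posOf x a m := by
  intro a
  induction a with
  | nil => intro m; simp [posOf]
  | cons y ys ih =>
    intro m
    have hmap : (List.range (y :: ys).length).map (fun k => ((y :: ys).getD k 0, (k : Int) + m))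
        = (y, m) :: (List.range ys.length).map (fun k => (ys.getD k 0, (k : Int) + (m + 1))) := by
      rw [List.length_cons, List.range_succ_eq_map, List.map_cons, List.map_map]
      simp only [List.cons.injEq]
      refine ⟨by simp, List.map_congr_left ?_⟩
      intro k hk
      simp only [Function.comp_apply, List.getD_cons_succ]
      have hc : ((k.succ : Nat) : Int) + m = (k : Int) + (m + 1) := by push_cast; ring
      rw [hc]
    rw [hmap]
    by_cases h : y = x
    · rw [List.filter_cons_of_pos (by simp [h]), List.map_cons, ih (m + 1)]
      simp [posOf, h]
    · rw [List.filter_cons_of_neg (by simp [h]), ih (m + 1)]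
      simp [posOf, h]

-- B's filtered/mapped zipIdx list = posOf
lemma B_pos (x : Int) : ∀ (a : List Int) (m : Nat),
    ((a.zipIdx m).filter (fun p => p.1 == x)).map (fun p => ((p.2 : Nat) : Int))
      = posOf x a (m : Int) := by
  intro a
  induction a with
  | nil => intro m; simp [posOf]
  | cons y ys ih =>
    intro m
    simp only [List.zipIdx, List.filter_cons]
    by_cases h : y = x
    · simp [posOf, h, ih, Nat.cast_add, Nat.cast_one]
    · have hb : (y == x) = false := by simp [h]
      simp [posOf, h, hb, ih]

lemma zipfst : ∀ (a : List Int) (m : Nat), (a.zipIdx m).map (fun p => p.1) = a := by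
  intro a
  induction a with
  | nil => intro m; simp
  | cons y ys ih => intro m; simp [List.zipIdx, ih]

lemma posOf_ne_nil {x : Int} : ∀ {a : List Int} (m : Int), x ∈ a → posOf x a m ≠ [] := by
  intro a
  induction a with
  | nil => intro m h; simp at h
  | cons y ys ih =>
    intro m h
    by_cases hy : y = x
    · simp [posOf, hy]
    · rcases List.mem_cons.mp h with h' | h'
      · exact absurd h'.symm hy
      · simp only [posOf, if_neg hy]
        exact ih (m + 1) h'

lemma getLastD_cons_eq (q last : Int) (qs : List Int) :
    qs.getLastD q = (q :: qs).getLastD last := by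
  induction qs generalizing q last with
  | nil => rfl
  | cons r rs ih =>
    have h : (r :: rs).getLast?.isSome := List.getLast?_isSome.mpr (by simp)
    obtain ⟨v, hv⟩ := Option.isSome_iff_exists.mp h
    simp [List.getLastD_eq_getLast?, List.getLast?_cons_cons, hv]

-- the record fold from a "diff already set" state
lemma stO_go : ∀ (rest : List Int) (last dv : Int) (ok : Bool),
    rest.foldl (fun o v => some (updState o v)) (some (last, some dv, ok))
      = some (rest.getLastD last, some dv, ok && okFrom last dv rest) := by
  intro rest
  induction rest with
  | nil => intro last dv ok; simp [okFrom]
  | cons q qs ih =>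
    intro last dv ok
    rw [List.foldl_cons]
    have hu : updState (some (last, some dv, ok)) q
        = (q, some dv, ok && decide (q - last = dv)) := rfl
    rw [hu, ih, getLastD_cons_eq q last qs]
    simp [okFrom, Bool.and_assoc]

lemma foldl_some : ∀ (l : List Int) (s : Int × Option Int × Bool),
    ∃ t, l.foldl (fun o v => some (updState o v)) (some s) = some t := by
  intro l
  induction l with
  | nil => intro s; exact ⟨s, rfl⟩
  | cons q qs ih =>
    intro s
    rw [List.foldl_cons]
    exact ih (updState (some s) q)

lemma stO_some (ps : List Int) (h : ps ≠ []) : ∃ st, stO ps = some st := by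
  match ps, h with
  | p :: rest, _ =>
    unfold stO
    rw [List.foldl_cons]
    exact foldl_some rest (updState none p)

-- A's inner AP loop agrees with okFrom
lemma apLoop_eq (ps : List Int) (cd : Int) :
    ∀ (n j : Nat), ps.length - j = n → 1 ≤ j → j ≤ ps.length →
    apLoop ps cd (PySem.List.pyRange (j : Int) (ps.length : Int))
      = okFrom (ps.getD (j - 1) 0) cd (ps.drop j) := by
  intro n
  induction n with
  | zero =>
    intro j hn h1 h2
    have hj : j = ps.length := by omega
    subst hj
    have hemp : PySem.List.pyRange (ps.length : Int) (ps.length : Int) = [] := by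
      simp [PySem.List.pyRange]
    rw [hemp, List.drop_length]
    rfl
  | succ n ih =>
    intro j hn h1 h2
    have hlt : j < ps.length := by omega
    have hltI : (j : Int) < (ps.length : Int) := by exact_mod_cast hlt
    rw [PySem.List.pyRange_one_cons hltI]
    show (if PySem.List.pyGetD ps (j : Int) 0 - PySem.List.pyGetD ps ((j : Int) - 1) 0 ≠ cd
          then false
          else apLoop ps cd (PySem.List.pyRange ((j : Int) + 1) (ps.length : Int)))
        = okFrom (ps.getD (j - 1) 0) cd (ps.drop j)
    have hget : PySem.List.pyGetD ps (j : Int) 0 = ps.getD j 0 := by simp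
    have hj1 : (j : Int) - 1 = ((j - 1 : Nat) : Int) := by omega
    have hget' : PySem.List.pyGetD ps ((j : Int) - 1) 0 = ps.getD (j - 1) 0 := by
      rw [hj1]; simp
    have hcast : (j : Int) + 1 = ((j + 1 : Nat) : Int) := by push_cast; ring
    rw [hget, hget', hcast, ih (j + 1) (by omega) (by omega) (by omega)]
    rw [List.drop_eq_getElem_cons hlt]
    have e1 : ps.getD j 0 = ps[j] := by
      rw [List.getD_eq_getElem?_getD, List.getElem?_eq_getElem hlt]; rfl
    have e2 : ps.getD (j + 1 - 1) 0 = ps[j] := by simpa using e1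
    simp only [okFrom]
    rw [e2, e1]
    by_cases hc : ps[j] - ps.getD (j - 1) 0 = cd
    · simp_all
    · simp_all

-- the two emissions agree on a non-empty position list
lemma emit_eq (x : Int) (ps : List Int) (hne : ps ≠ []) (st : Int × Option Int × Bool)
    (hst : stO ps = some st) : emitA x ps = emitB x st := by
  match ps, hne with
  | [p], _ =>
    have h0 : stO [p] = some (p, none, true) := rfl
    rw [h0] at hst
    have hs : st = (p, none, true) := (Option.some_inj.mp hst).symm
    subst hs
    have hlen : PySem.List.len [p] = 1 := by simp
    rw [emitA, if_pos hlen]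
    rfl
  | p :: q :: qs, _ =>
    have h0 : stO (p :: q :: qs)
        = qs.foldl (fun o v => some (updState o v)) (some (q, some (q - p), true)) := rfl
    rw [h0, stO_go] at hst
    have hs : st = (qs.getLastD q, some (q - p), true && okFrom q (q - p) qs) :=
      (Option.some_inj.mp hst).symm
    subst hs
    have hlen1 : PySem.List.len (p :: q :: qs) ≠ 1 := by
      simp only [PySem.List.len_eq, List.length_cons]
      omega
    have hg1 : PySem.List.pyGetD (p :: q :: qs) 1 0 = q := by
      simp [PySem.List.pyGetD_ofNat']
    have hg0 : PySem.List.pyGetD (p :: q :: qs) 0 0 = p := by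
      simp [PySem.List.pyGetD_ofNat']
    have hlen2 : 2 ≤ (p :: q :: qs).length := by
      simp only [List.length_cons]; omega
    have hap := apLoop_eq (p :: q :: qs) (q - p) ((p :: q :: qs).length - 2) 2 rfl
      (by omega) hlen2
    have hc2 : ((2 : Nat) : Int) = (2 : Int) := by norm_num
    rw [hc2] at hap
    have hd : (p :: q :: qs).getD (2 - 1) 0 = q := rfl
    have hdrop : (p :: q :: qs).drop 2 = qs := rfl
    rw [hd, hdrop] at hap
    rw [emitA, if_neg hlen1, hg1, hg0, PySem.List.len_eq, hap, emitB]
    simp only [Bool.true_and]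
    by_cases hok : okFrom q (q - p) qs
    · simp [hok]
    · simp [hok]

-- characterisations of the two dicts
lemma aDict_getD (a : List Int) (x : Int) : (aDict a).getD x [] = posOf x a 1 := by
  have h1 : aDict a
      = ((PySem.List.pyRange 0 (PySem.List.len a)).map
          (fun i => (PySem.List.pyGetD a i 0, i + 1))).foldl
        (fun m p => m.modify p.1 [] (· ++ [p.2])) PySem.Dict.empty := by
    unfold aDict
    rw [List.foldl_map]
  have h2 : (PySem.List.pyRange 0 (PySem.List.len a)).map
      (fun i => (PySem.List.pyGetD a i 0, i + 1))
      = (List.range a.length).map (fun k => (a.getD k 0, (k : Int) + 1)) := by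
    rw [PySem.List.len_eq, PySem.List.pyRange_zero_natCast, List.map_map]
    exact List.map_congr_left (fun k hk => by simp)
  rw [h1, h2, PySem.Dict.getD_foldl_modify_append]
  rw [PySem.Dict.getD_empty, List.nil_append]
  exact A_pos x a 1

lemma bDict_get? (a : List Int) (x : Int) : (bDict a).get? x = stO (posOf x a 1) := by
  unfold bDict
  rw [alt_get?, PySem.Dict.get?_empty, B_pos]
  norm_num [stO]

lemma aDict_keys (a : List Int) : (aDict a).keys = PySem.Set.update [] a := by
  have h2 : (aDict a).keys = PySem.Set.update PySem.Dict.empty.keys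
      ((PySem.List.pyRange 0 (PySem.List.len a)).map (fun i => PySem.List.pyGetD a i 0)) :=
    PySem.Dict.keys_foldl_modify_key _ _ _ _ _
  rw [h2, PySem.Dict.keys_empty]
  congr 1
  exact PySem.List.map_pyGetD_pyRange_zero a 0

lemma bDict_keys (a : List Int) : (bDict a).keys = PySem.Set.update [] a := by
  have h2 : (bDict a).keys = PySem.Set.update PySem.Dict.empty.keys
      ((a.zipIdx 1).map (fun p => p.1)) :=
    PySem.Dict.keys_foldl_insert_key _ _ _ _
  rw [h2, PySem.Dict.keys_empty]
  congr 1
  exact zipfst a 1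

lemma aDict_nodup (a : List Int) : (aDict a).keys.Nodup :=
  PySem.Dict.nodup_keys_foldl_modify_key _ _ _ _ _ PySem.Dict.nodup_keys_empty

lemma bDict_nodup (a : List Int) : (bDict a).keys.Nodup :=
  PySem.Dict.nodup_keys_foldl_insert_key _ _ _ _ PySem.Dict.nodup_keys_empty

lemma mem_update_nil {x : Int} (a : List Int) (h : x ∈ PySem.Set.update [] a) : x ∈ a := by
  have he : PySem.Set.update ([] : List Int) a = PySem.Set.ofList a := by
    rw [PySem.Set.ofList_eq_foldl]; rfl
  rw [he] at h
  exact (PySem.Set.mem_ofList a x).mp h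

theorem find_valid_x_eq (a : List Int) : find_valid_x a = find_valid_x_alt a := by
  rw [find_valid_x_def, find_valid_x_alt_def, foldlA_filterMap, List.nil_append]
  rw [PySem.Dict.items_eq_map_keys (aDict a) (aDict_nodup a) []]
  rw [PySem.Dict.items_eq_map_keys (bDict a) (bDict_nodup a) (0, none, true)]
  rw [List.filterMap_map, List.filterMap_map]
  rw [aDict_keys, bDict_keys]
  apply List.filterMap_congr
  intro x hx
  have hxa : x ∈ a := mem_update_nil a hx
  obtain ⟨st, hst⟩ := stO_some (posOf x a 1) (posOf_ne_nil 1 hxa)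
  have hbd : (bDict a).getD x (0, none, true) = st := by
    rw [PySem.Dict.getD_eq_get?_getD, bDict_get?, hst]
    rfl
  show emitA x ((aDict a).getD x []) = emitB x ((bDict a).getD x (0, none, true))
  rw [aDict_getD, hbd]
  exact emit_eq x (posOf x a 1) (posOf_ne_nil 1 hxa) st hst

-- ===== VERDICT (by name: the statement is the Claim_ definition above) =====
theorem find_valid_x_spec : Claim_equal_find_valid_x := by
  intro a _
  unfold Spec_find_valid_x
  exact find_valid_x_eq a
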